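-- pv_equiv track=rewrite | github.com/celltec/ClusterDetection | solution.py | check_cluster_size
-- ===== SOURCE A (Python) =====
-- def check_cluster_size(matrix, position, size):
--     """Calculates and returns the size of a cluster."""
--     if size > 0:
--         for y in range(position['y'] + 1, position['y'] + size):
--             for x in range(position['x'], position['x'] + size):
--                 if matrix[y][x] is "O":
--                     new_size = x - position['x']
--                     if new_size is 0:
--                         new_size = y - position['y']
--                         return new_size
--                     return check_cluster_size(matrix, position, new_size)
--         return size
-- ===== SOURCE B (Python) =====
-- def check_cluster_size(matrix, position, size):
--     """Calculates and returns the size of a cluster (single forward pass, no restarts)."""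
--     if size <= 0:
--         return None
--     y0 = position['y']
--     s = size
--     dy = 1
--     while dy < s:
--         x0 = position['x']
--         row = matrix[y0 + dy]
--         hit = None
--         for dx in range(s):
--             if row[x0 + dx] == "O":
--                 hit = dx
--                 break
--         if hit == 0:
--             return dy
--         if hit is not None:
--             s = hit
--         dy += 1
--     return s
-- ===== Notes on version B (the rewrite author's own statement) =====
-- stated objective: alternative
-- what changed: A restarts its full row-major rescan from the top row on every shrink (tail recursion on the new size); B makes a single forward pass over the rows, narrowing the scan width in place, so each row is scanned at most once.
-- outside the precondition, e.g. on check_cluster_size([['X', 'X'], ['O']], {'x': 0, 'y': 0}, 2): A returns 1, B returns 1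
import Mathlib
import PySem

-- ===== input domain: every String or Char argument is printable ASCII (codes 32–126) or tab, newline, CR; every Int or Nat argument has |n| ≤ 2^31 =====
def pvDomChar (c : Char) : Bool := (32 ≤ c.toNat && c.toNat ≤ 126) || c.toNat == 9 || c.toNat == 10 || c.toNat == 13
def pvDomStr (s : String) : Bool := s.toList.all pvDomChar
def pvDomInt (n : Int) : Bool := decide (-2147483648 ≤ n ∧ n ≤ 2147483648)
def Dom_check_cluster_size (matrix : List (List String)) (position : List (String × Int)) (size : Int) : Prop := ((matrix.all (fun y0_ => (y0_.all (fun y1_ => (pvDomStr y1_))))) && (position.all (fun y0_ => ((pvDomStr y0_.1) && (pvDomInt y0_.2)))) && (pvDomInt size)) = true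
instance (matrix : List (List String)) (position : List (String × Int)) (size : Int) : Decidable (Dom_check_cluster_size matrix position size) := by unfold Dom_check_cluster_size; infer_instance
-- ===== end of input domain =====

-- B replaces A's restart-from-the-top recursion by a single forward row pass (each row is
-- scanned at most once), returning the same value on every input Pre_ admits.

-- ===== PORT A =====
-- matrix[y][x] is "O"  (CPython interns 1-char strings, so 'is "O"' = '== "O"';
-- Python's negative-index wraparound is pyGet?'s; out-of-range raises in Python → outside Pre_,
-- here pyGet? yields none → false)
def pvCellO (matrix : List (List String)) (y x : Int) : Bool :=
  match PySem.List.pyGet? matrix y with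
  | some row => PySem.List.pyGet? row x == some "O"
  | none => false

-- the nested 'for y: for x: if …: return/break' of A: first "O" in row-major order
def pvFirstO (matrix : List (List String)) (y0 x0 s : Int) : Option (Int × Int) :=
  (PySem.List.pyRange (y0+1) (y0+s) 1).findSome? (fun y =>
    ((PySem.List.pyRange x0 (x0+s) 1).find? (fun x => pvCellO matrix y x)).map (fun x => (y, x)))

-- A's tail recursion; fuel makes totality explicit (new_size < size, so size.toNat fuel suffices)
def pvGoA (matrix : List (List String)) (y0 x0 : Int) : Nat → Int → Option Int
  | 0, _ => none
  | Nat.succ fuel, s =>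
    if 0 < s then
      match pvFirstO matrix y0 x0 s with
      | none => some s
      | some (y, x) =>
        if x - x0 = 0 then some (y - y0) else pvGoA matrix y0 x0 fuel (x - x0)
    else none

def check_cluster_size (matrix : List (List String)) (position : List (String × Int)) (size : Int) : Option Int :=
  if 0 < size then
    match (PySem.Dict.mk position).get? "y" with
    | none => none        -- KeyError in Python; outside Pre_
    | some y0 =>
      if 1 < size then    -- the y-loop body runs, so position['x'] is evaluated
        match (PySem.Dict.mk position).get? "x" with
        | none => none    -- KeyError in Python; outside Pre_
        | some x0 => pvGoA matrix y0 x0 size.toNat size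
      else some size      -- size = 1: range(y+1, y+1) is empty, 'x' is never read, loop falls through
  else none

-- ===== PORT B =====
-- B's own cell test: row[x0+dx] == "O" (same Python indexing semantics, its own definition)
def pvCellOB (matrix : List (List String)) (y x : Int) : Bool :=
  match PySem.List.pyGet? matrix y with
  | some row => PySem.List.pyGet? row x == some "O"
  | none => false

-- B's while loop: state (dy, s); each row scanned once; position['x'] is read inside the loop,
-- as in Source B; fuel = size.toNat (s - dy shrinks each step)
def pvGoB (matrix : List (List String)) (position : List (String × Int)) (y0 : Int) : Nat → Int → Int → Option Int
  | 0, _, _ => none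
  | Nat.succ fuel, dy, s =>
    if dy < s then
      match (PySem.Dict.mk position).get? "x" with
      | none => none      -- KeyError in Python; outside Pre_
      | some x0 =>
        match (PySem.List.pyRange 0 s 1).find? (fun dx => pvCellOB matrix (y0+dy) (x0+dx)) with
        | some dx => if dx = 0 then some dy else pvGoB matrix position y0 fuel (dy+1) dx
        | none => pvGoB matrix position y0 fuel (dy+1) s
    else some s

def check_cluster_size_alt (matrix : List (List String)) (position : List (String × Int)) (size : Int) : Option Int :=
  if size ≤ 0 then none
  else
    match (PySem.Dict.mk position).get? "y" with
    | none => none        -- KeyError in Python; outside Pre_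
    | some y0 => pvGoB matrix position y0 size.toNat 1 size

-- ===== PRECONDITION & SPEC =====
-- Pre_ excludes exactly the inputs on which Python A raises: a missing 'y' key with size > 0, a
-- missing 'x' key with size > 1, or a scan index outside Python's valid (possibly negative,
-- wraparound) range. Because it requires the WHOLE potential size×size scan region to be
-- index-valid, it also excludes some inputs where an early "O" stops the scan before the first
-- out-of-range cell, so A still returns — on those A and B return the same value (see cite).
def Pre_check_cluster_size (matrix : List (List String)) (position : List (String × Int)) (size : Int) : Prop :=
  size ≤ 0 ∨
  (((PySem.Dict.mk position).get? "y").isSome = true ∧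
   (size = 1 ∨
    (((PySem.Dict.mk position).get? "x").isSome = true ∧
     (let y0 := ((PySem.Dict.mk position).get? "y").getD 0
      let x0 := ((PySem.Dict.mk position).get? "x").getD 0
      ∀ dy ∈ PySem.List.pyRange 1 size 1,
        (PySem.List.pyGet? matrix (y0 + dy)).isSome = true ∧
        ∀ dx ∈ PySem.List.pyRange 0 size 1,
          (PySem.List.pyGet? (PySem.List.pyGetD matrix (y0 + dy) []) (x0 + dx)).isSome = true))))
instance (matrix : List (List String)) (position : List (String × Int)) (size : Int) : Decidable (Pre_check_cluster_size matrix position size) := by unfold Pre_check_cluster_size; infer_instance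

def pvWitness_check_cluster_size : List (List String) × (List (String × Int)) × Int :=
  ([["X", "X"], ["O", "O"]], [("x", 0), ("y", 0)], 2)

def Spec_check_cluster_size (matrix : List (List String)) (position : List (String × Int)) (size : Int) (out : Option Int) : Prop := out = check_cluster_size_alt matrix position size
instance (matrix : List (List String)) (position : List (String × Int)) (size : Int) (out : Option Int) : Decidable (Spec_check_cluster_size matrix position size out) := by unfold Spec_check_cluster_size; infer_instance

-- ===== CLAIM (what is proved, stated in full; the proofs are below) =====
def Claim_equal_check_cluster_size : Prop := ∀ (matrix : List (List String)) (position : List (String × Int)) (size : Int), Dom_check_cluster_size matrix position size → Pre_check_cluster_size matrix position size → Spec_check_cluster_size matrix position size (check_cluster_size matrix position size)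

-- ===== LEMMAS AND PROOFS =====

-- shift a range to start at 0
theorem pv_range_shift (x0 s : Int) :
    PySem.List.pyRange x0 (x0+s) 1 = (PySem.List.pyRange 0 s 1).map (fun dx => x0 + dx) := by
  rw [PySem.List.pyRange_one, PySem.List.pyRange_one, List.map_map]
  have h : x0 + s - x0 = s - 0 := by ring
  rw [h]
  exact List.map_congr_left (fun k _ => by simp)

-- findSome? over a range may skip a clean prefix
theorem pv_findSome_skip {α : Type} (f : Int → Option α) (b : Int) :
    ∀ (n : Nat) (a c : Int), (c - a).toNat = n → a ≤ c →
      (∀ y, a ≤ y → y < c → f y = none) →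
      (PySem.List.pyRange a b 1).findSome? f = (PySem.List.pyRange c b 1).findSome? f := by
  intro n
  induction n with
  | zero =>
    intro a c h hac _
    have : a = c := by omega
    rw [this]
  | succ n ih =>
    intro a c h hac hcl
    have hlt : a < c := by omega
    by_cases hb : a < b
    · rw [PySem.List.pyRange_one_cons hb, List.findSome?_cons, hcl a le_rfl hlt]
      exact ih (a+1) c (by omega) (by omega) (fun y hy1 hy2 => hcl y (by omega) hy2)
    · rw [PySem.List.pyRange_one_eq_nil (by omega : b ≤ a),
          PySem.List.pyRange_one_eq_nil (by omega : b ≤ c)]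

-- a find? that fails on a range fails on any shorter range with the same start
theorem pv_find_none_shorter (p : Int → Bool) (a b b' : Int) (hb : b' ≤ b)
    (h : (PySem.List.pyRange a b 1).find? p = none) :
    (PySem.List.pyRange a b' 1).find? p = none := by
  rw [List.find?_eq_none] at h ⊢
  intro x hx
  exact h x (by rw [PySem.List.mem_pyRange_one] at hx ⊢; omega)

-- find? = some x on a range ⇒ find? on the prefix strictly before x is none
theorem pv_find_some_before (p : Int → Bool) :
    ∀ (n : Nat) (a b x : Int), (b - a).toNat = n →
      (PySem.List.pyRange a b 1).find? p = some x →
      (PySem.List.pyRange a x 1).find? p = none := by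
  intro n
  induction n with
  | zero =>
    intro a b x h hf
    rw [PySem.List.pyRange_one_eq_nil (by omega : b ≤ a)] at hf
    simp at hf
  | succ n ih =>
    intro a b x h hf
    have hb : a < b := by omega
    rw [PySem.List.pyRange_one_cons hb] at hf
    by_cases hp : p a
    · rw [List.find?_cons_of_pos hp] at hf
      have : a = x := by injection hf
      subst this
      rw [PySem.List.pyRange_one_eq_nil le_rfl]
      rfl
    · rw [List.find?_cons_of_neg (by simp [hp])] at hf
      have hax : a < x := by
        have := List.mem_of_find?_eq_some hf
        rw [PySem.List.mem_pyRange_one] at this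
        omega
      rw [PySem.List.pyRange_one_cons hax, List.find?_cons_of_neg (by simp [hp])]
      exact ih (a+1) b x (by omega) hf

-- row scan of A, as it appears inside pvFirstO
def pvRowFind (matrix : List (List String)) (x0 y s : Int) : Option Int :=
  (PySem.List.pyRange x0 (x0+s) 1).find? (fun x => pvCellO matrix y x)

-- A's row scan equals B's offset scan, shifted by x0
theorem pv_rowFind_shift (matrix : List (List String)) (x0 y s : Int) :
    pvRowFind matrix x0 y s
      = ((PySem.List.pyRange 0 s 1).find? (fun dx => pvCellO matrix y (x0+dx))).map (fun dx => x0 + dx) := by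
  unfold pvRowFind
  rw [pv_range_shift, List.find?_map]
  rfl

-- Main invariant: if every row strictly before dy is clean at width s, A's restart recursion
-- and B's single forward pass agree.
theorem pv_main (matrix : List (List String)) (position : List (String × Int)) (y0 x0 : Int)
    (hx0 : (PySem.Dict.mk position).get? "x" = some x0) :
    ∀ (fb : Nat) (fa : Nat) (dy s : Int), 1 ≤ dy → 0 < s →
      s.toNat ≤ fa → (s - dy).toNat < fb →
      (∀ dy', 1 ≤ dy' → dy' < dy → pvRowFind matrix x0 (y0+dy') s = none) →
      pvGoA matrix y0 x0 fa s = pvGoB matrix position y0 fb dy s := by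
  intro fb
  induction fb with
  | zero => intro fa dy s _ _ _ hfb _; omega
  | succ fb ih =>
    intro fa dy s hdy hs hfa hfb hcl
    cases fa with
    | zero => omega
    | succ fa =>
      have hskip : pvFirstO matrix y0 x0 s
          = (PySem.List.pyRange (y0+dy) (y0+s) 1).findSome? (fun y =>
              (pvRowFind matrix x0 y s).map (fun x => (y, x))) := by
        unfold pvFirstO
        exact pv_findSome_skip _ _ (dy - 1).toNat (y0+1) (y0+dy) (by omega) (by omega)
          (fun y hy1 hy2 => by
            have : pvRowFind matrix x0 y s = none := by
              have := hcl (y - y0) (by omega) (by omega)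
              rwa [show y0 + (y - y0) = y by ring] at this
            unfold pvRowFind at this
            simp [this])
      by_cases hds : dy < s
      · -- B enters the loop; the first interesting row is y0+dy
        rw [PySem.List.pyRange_one_cons (by omega : y0+dy < y0+s), List.findSome?_cons] at hskip
        have hrow := pv_rowFind_shift matrix x0 (y0+dy) s
        cases hbs : (PySem.List.pyRange 0 s 1).find? (fun dx => pvCellOB matrix (y0+dy) (x0+dx)) with
        | none =>
          -- row dy clean too: B moves on; A's term is unchanged
          have hbsA : (PySem.List.pyRange 0 s 1).find? (fun dx => pvCellO matrix (y0+dy) (x0+dx)) = none := hbs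
          have hrn : pvRowFind matrix x0 (y0+dy) s = none := by rw [hrow, hbsA]; rfl
          have hB : pvGoB matrix position y0 (fb+1) dy s = pvGoB matrix position y0 fb (dy+1) s := by
            simp only [pvGoB, if_pos hds, hx0, hbs]
          rw [hB]
          exact ih (fa+1) (dy+1) s (by omega) hs hfa (by omega)
            (fun dy' h1 h2 => by
              by_cases h : dy' < dy
              · exact hcl dy' h1 h
              · have : dy' = dy := by omega
                rw [this]; exact hrn)
        | some dx =>
          have hbsA : (PySem.List.pyRange 0 s 1).find? (fun dx => pvCellO matrix (y0+dy) (x0+dx)) = some dx := hbs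
          have hmem := List.mem_of_find?_eq_some hbs
          rw [PySem.List.mem_pyRange_one] at hmem
          have hrs : pvRowFind matrix x0 (y0+dy) s = some (x0 + dx) := by rw [hrow, hbsA]; rfl
          have hfo : pvFirstO matrix y0 x0 s = some (y0+dy, x0+dx) := by
            rw [hskip, hrs]; rfl
          have hA : pvGoA matrix y0 x0 (fa+1) s
              = if x0 + dx - x0 = 0 then some (y0 + dy - y0)
                else pvGoA matrix y0 x0 fa (x0 + dx - x0) := by
            simp only [pvGoA, if_pos hs, hfo]
          by_cases hdx : dx = 0
          · subst hdx
            have hB : pvGoB matrix position y0 (fb+1) dy s = some dy := by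
              simp [pvGoB, hds, hx0, hbs]
            rw [hA, hB, if_pos (by ring), show y0 + dy - y0 = dy by ring]
          · have hB : pvGoB matrix position y0 (fb+1) dy s = pvGoB matrix position y0 fb (dy+1) dx := by
              simp only [pvGoB, if_pos hds, hx0, hbs, if_neg hdx]
            rw [hA, hB, if_neg (by omega), show x0 + dx - x0 = dx by ring]
            exact ih fa (dy+1) dx (by omega) (by omega) (by omega) (by omega)
              (fun dy' h1 h2 => by
                by_cases h : dy' < dy
                · exact pv_find_none_shorter _ _ _ _ (by omega) (hcl dy' h1 h)
                · have hde : dy' = dy := by omega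
                  subst hde
                  have := pv_find_some_before (fun x => pvCellO matrix (y0+dy') x)
                    (x0 + s - x0).toNat x0 (x0+s) (x0+dx) rfl hrs
                  unfold pvRowFind
                  exact this)
      · -- B exits the loop: all rows clean, A's scan is empty, both return s
        rw [PySem.List.pyRange_one_eq_nil (by omega : y0+s ≤ y0+dy)] at hskip
        have hB : pvGoB matrix position y0 (fb+1) dy s = some s := by
          simp only [pvGoB, if_neg hds]
        have hA : pvGoA matrix y0 x0 (fa+1) s = some s := by
          simp only [pvGoA, if_pos hs, hskip, List.findSome?_nil]
        rw [hA, hB]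

-- the two entry points agree wherever Pre_ holds
theorem pv_entry (matrix : List (List String)) (position : List (String × Int)) (size : Int)
    (hpre : Pre_check_cluster_size matrix position size) :
    check_cluster_size matrix position size = check_cluster_size_alt matrix position size := by
  unfold check_cluster_size check_cluster_size_alt
  by_cases hs : 0 < size
  · rw [if_pos hs, if_neg (by omega : ¬ size ≤ 0)]
    unfold Pre_check_cluster_size at hpre
    rcases hpre with h | ⟨hy, hrest⟩
    · omega
    · obtain ⟨y0, hy0⟩ := Option.isSome_iff_exists.mp hy
      simp only [hy0]
      by_cases h1 : 1 < size
      · rw [if_pos h1]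
        rcases hrest with h | ⟨hx, _⟩
        · omega
        · obtain ⟨x0, hx0⟩ := Option.isSome_iff_exists.mp hx
          simp only [hx0]
          exact pv_main matrix position y0 x0 hx0 size.toNat size.toNat 1 size le_rfl hs le_rfl
            (by omega) (fun dy' h1 h2 => by omega)
      · have hs1 : size = 1 := by omega
        subst hs1
        rw [if_neg h1]
        simp [pvGoB]
  · rw [if_neg hs, if_pos (by omega : size ≤ 0)]

-- ===== VERDICT (by name: the statement is the Claim_ definition above) =====
theorem check_cluster_size_spec : Claim_equal_check_cluster_size := by
  intro matrix position size _ hpre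
  unfold Spec_check_cluster_size
  exact pv_entry matrix position size hpre
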